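-- pv_equiv track=rewrite | github.com/antonAtananasov/decompile-graphziss | utilziss/code_utils.py | get_functions
-- ===== SOURCE A (Python) =====
-- def get_functions(extracted_code: str, prefix: str) -> dict[str:str]:
--     extracted_functions = {}
--     start = 0
--     while True:
--         firstIndex = extracted_code.find(prefix, start)
--         if firstIndex < 0:
--             break
--         secondIndex = extracted_code.find(prefix, firstIndex + 1)
--         if secondIndex < 0:
--             break
--
--         function_code = extracted_code[firstIndex:secondIndex].strip()
--         function_name = function_code.split("\n")[0].removeprefix(prefix).strip()
--         extracted_functions[function_name] = function_code
--
--         start = secondIndex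
--
--     return extracted_functions
-- ===== SOURCE B (Python) =====
-- def get_functions(extracted_code: str, prefix: str) -> dict:
--     # pass 1: index table of successive prefix occurrence positions
--     positions = []
--     i = extracted_code.find(prefix)
--     while i >= 0:
--         positions.append(i)
--         i = extracted_code.find(prefix, i + 1)
--     # pass 2: each consecutive pair of positions delimits one function
--     result = {}
--     for a, b in zip(positions, positions[1:]):
--         code = extracted_code[a:b].strip()
--         name = code.split("\n")[0].removeprefix(prefix).strip()
--         result[name] = code
--     return result
-- ===== Notes on version B (the rewrite author's own statement) =====
-- stated objective: alternative
-- what changed: A's single stateful while-loop (two find calls per iteration, building the dict as it scans) is replaced by two passes: a first pass collecting the index table of all prefix occurrence positions, then a pass over zip(positions, positions[1:]) that slices and names each function.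
import Mathlib
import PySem

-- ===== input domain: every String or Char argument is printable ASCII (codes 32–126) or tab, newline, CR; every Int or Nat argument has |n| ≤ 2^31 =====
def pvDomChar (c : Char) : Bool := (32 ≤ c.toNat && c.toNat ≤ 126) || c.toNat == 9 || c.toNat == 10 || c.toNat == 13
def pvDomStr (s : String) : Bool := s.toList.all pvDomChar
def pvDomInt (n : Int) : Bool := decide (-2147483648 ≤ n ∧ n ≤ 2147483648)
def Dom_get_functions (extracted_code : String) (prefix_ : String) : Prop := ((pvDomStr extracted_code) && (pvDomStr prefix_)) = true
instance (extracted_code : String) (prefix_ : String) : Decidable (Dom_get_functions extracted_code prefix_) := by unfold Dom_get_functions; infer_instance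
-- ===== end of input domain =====

-- B replaces A's single stateful while-loop (two find calls per iteration, dict built as it scans)
-- by two passes: first an index table of all prefix occurrence positions, then one pass over
-- consecutive position pairs; objective: alternative decomposition, same cost.

-- ===== PORT A =====
-- shared transliteration of the two identical extraction lines of both Pythons:
-- function_code = extracted_code[a:b].strip(); function_name = function_code.split("\n")[0].removeprefix(prefix).strip()
def pvExtract (s pre : List Char) (a b : Int) : (List Char) × (List Char) :=
  let code := PySem.Chars.strip (PySem.List.slice s (some a) (some b))
  let line := (PySem.Chars.splitOn code ['\n']).headD []   -- split("\n")[0]; splitOn is never []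
  -- str.removeprefix, exact: drop the prefix iff the string starts with it
  let line := if PySem.Chars.startswith line pre then line.drop pre.length else line
  (PySem.Chars.strip line, code)

-- A's while-loop; fuel s.length + 1 is enough: the successive 'start' values strictly increase
-- and stay ≤ len(s), so at most len(s) iterations recurse before one breaking iteration
def pvLoopA (s pre : List Char) : Nat → Int → PySem.Dict (List Char) (List Char) → PySem.Dict (List Char) (List Char)
  | 0, _, d => d
  | fuel+1, start, d =>
    let firstIndex := PySem.Chars.findFrom s pre start
    if firstIndex < 0 then d
    else
      let secondIndex := PySem.Chars.findFrom s pre (firstIndex + 1)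
      if secondIndex < 0 then d
      else
        let e := pvExtract s pre firstIndex secondIndex
        pvLoopA s pre fuel secondIndex (d.insert e.1 e.2)

def get_functions (extracted_code : String) (prefix_ : String) : List (String × String) :=
  let s := extracted_code.toList
  let pre := prefix_.toList
  (pvLoopA s pre (s.length + 1) 0 PySem.Dict.empty).items.map (fun p => (String.mk p.1, String.mk p.2))

-- ===== PORT B =====
-- pass 1 of B: the index table 'positions' (i = find(prefix); while i >= 0: append; i = find(prefix, i+1));
-- fuel s.length + 2 is enough: the positions are strictly increasing and ≤ len(s)
def pvPositions (s pre : List Char) : Nat → Int → List Int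
  | 0, _ => []
  | fuel+1, i => if i < 0 then [] else i :: pvPositions s pre fuel (PySem.Chars.findFrom s pre (i + 1))

def get_functions_alt (extracted_code : String) (prefix_ : String) : List (String × String) :=
  let s := extracted_code.toList
  let pre := prefix_.toList
  let positions := pvPositions s pre (s.length + 2) (PySem.Chars.find s pre)
  -- pass 2: for a, b in zip(positions, positions[1:]): result[name] = code
  ((positions.zip (positions.drop 1)).foldl
      (fun d ab => let e := pvExtract s pre ab.1 ab.2; d.insert e.1 e.2)
      PySem.Dict.empty).items.map (fun p => (String.mk p.1, String.mk p.2))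

-- ===== PRECONDITION & SPEC =====
def Spec_get_functions (extracted_code : String) (prefix_ : String) (out : List (String × String)) : Prop := out = get_functions_alt extracted_code prefix_
instance (extracted_code : String) (prefix_ : String) (out : List (String × String)) : Decidable (Spec_get_functions extracted_code prefix_ out) := by unfold Spec_get_functions; infer_instance

-- ===== CLAIM (what is proved, stated in full; the proofs are below) =====
def Claim_equal_get_functions : Prop := ∀ (extracted_code : String) (prefix_ : String), Dom_get_functions extracted_code prefix_ → Spec_get_functions extracted_code prefix_ (get_functions extracted_code prefix_)

-- ===== LEMMAS AND PROOFS =====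

-- find(prefix, start) with start past the end of the string is -1
lemma pvFindFrom_of_gt (s pre : List Char) (start : Int) (h : (s.length : Int) < start) :
    PySem.Chars.findFrom s pre start = -1 := by
  have h0 : ¬ start < 0 := by omega
  simp [PySem.Chars.findFrom, h0, h]

-- a nonnegative find(prefix, start) result (0 ≤ start) is ≥ start, ≤ len, and marks an occurrence
lemma pvOcc (s pre : List Char) (start : Int) (h0 : 0 ≤ start)
    (hr : 0 ≤ PySem.Chars.findFrom s pre start) :
    start ≤ PySem.Chars.findFrom s pre start ∧
    pre <+: s.drop (PySem.Chars.findFrom s pre start).toNat ∧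
    PySem.Chars.findFrom s pre start ≤ (s.length : Int) := by
  by_cases hle : start ≤ (s.length : Int)
  · have hcast : start = ((start.toNat : Nat) : Int) := by omega
    have hk : start.toNat ≤ s.length := by omega
    rw [hcast] at hr ⊢
    have hne : PySem.Chars.findFrom s pre (start.toNat : Int) ≠ -1 := by omega
    have hspec := PySem.Chars.findFrom_natCast_spec s pre start.toNat hk hne
    refine ⟨hspec.1, hspec.2.1, ?_⟩
    have heq := PySem.Chars.findFrom_natCast s pre start.toNat hk
    rw [heq] at hr ⊢
    have hfl := PySem.Chars.find_le_length (List.drop start.toNat s) pre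
    simp only [List.length_drop] at hfl
    split at hr
    · omega
    · split
      · omega
      · omega
  · rw [pvFindFrom_of_gt s pre start (by omega)] at hr; omega

-- if the prefix occurs at l's head, find finds it there
lemma pvFind_eq_zero_of_prefix (l pre : List Char) (h : pre <+: l) : PySem.Chars.find l pre = 0 := by
  have h0 : 0 ≤ PySem.Chars.find l pre := (PySem.Chars.find_nonneg_iff l pre).2 h.isInfix
  have hs := PySem.Chars.find_spec h0
  by_contra hne
  have : 0 < (PySem.Chars.find l pre).toNat := by omega
  exact (hs.2 0 this) (by simpa using h)

-- find(prefix, k) = k when an occurrence starts exactly at k  (A re-finds the occurrence B already indexed)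
lemma pvStable (s pre : List Char) (k : Nat) (hk : k ≤ s.length) (h : pre <+: s.drop k) :
    PySem.Chars.findFrom s pre (k : Int) = (k : Int) := by
  rw [PySem.Chars.findFrom_natCast s pre k hk, pvFind_eq_zero_of_prefix _ _ h]
  norm_num

-- the bridge: A's loop from 'start' equals B's pair-pass over the position table that starts
-- at the first occurrence at or after 'start'
lemma pvLoopA_eq (s pre : List Char) : ∀ (fuel : Nat) (start : Int) (d : PySem.Dict (List Char) (List Char)),
    0 ≤ start →
    pvLoopA s pre fuel start d =
      (let ps := pvPositions s pre (fuel + 1) (PySem.Chars.findFrom s pre start)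
       (ps.zip (ps.drop 1)).foldl (fun d ab => let e := pvExtract s pre ab.1 ab.2; d.insert e.1 e.2) d) := by
  intro fuel
  induction fuel with
  | zero =>
    intro start d h0
    simp only [pvLoopA, pvPositions]
    split <;> simp
  | succ fuel ih =>
    intro start d h0
    simp only [pvLoopA, pvPositions]
    by_cases hf : PySem.Chars.findFrom s pre start < 0
    · simp [hf]
    · simp only [hf, if_false]
      set first := PySem.Chars.findFrom s pre start with hfirst
      by_cases hs2 : PySem.Chars.findFrom s pre (first + 1) < 0
      · simp [hs2]
      · simp only [hs2, if_false]
        set second := PySem.Chars.findFrom s pre (first + 1) with hsecond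
        have hocc := pvOcc s pre (first + 1) (by omega) (by omega)
        have hs0 : 0 ≤ second := by omega
        rw [← hsecond] at hocc
        have hstab : PySem.Chars.findFrom s pre second = second := by
          have hcast : second = ((second.toNat : Nat) : Int) := by omega
          rw [hcast]
          exact pvStable s pre second.toNat (by omega) hocc.2.1
        have := ih second (PySem.Dict.insert d (pvExtract s pre first second).1 (pvExtract s pre first second).2) hs0
        rw [this]
        simp only [hstab]
        have hunf : pvPositions s pre (fuel + 1) second = second :: pvPositions s pre fuel (PySem.Chars.findFrom s pre (second + 1)) := by
          simp [pvPositions, hs2]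
        simp only [hunf]
        simp [List.zip_cons_cons]

-- ===== VERDICT (by name: the statement is the Claim_ definition above) =====
theorem get_functions_spec : Claim_equal_get_functions := by
  intro ec p _
  unfold Spec_get_functions get_functions get_functions_alt
  have h := pvLoopA_eq ec.toList p.toList (ec.toList.length + 1) 0 PySem.Dict.empty (le_refl 0)
  simp only [PySem.Chars.findFrom_zero] at h
  simp only [h]
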